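-- pv_equiv track=rewrite | github.com/juansebastian2006/Binary-Translator | BinaryTranslator.py | binary_to_ascii
-- ===== SOURCE A (Python) =====
-- error_not_binary = " Make sure you have entered a binary text! "
--
-- def binary_to_ascii(binary):
--     new_text = []
--     for binary_num in binary.split():
--         is_binary = all([i == "1" or i == "0"
--                          for i in str(binary_num)])
--         if is_binary is True:
--             try:
--                 new_text.append(chr(sum(int(n)*int(2**i)
--                                         for i, n in enumerate(reversed(str(binary_num))))))
--             except ValueError:
--                 new_text.append('')
--         else:
--             return error_not_binary
--     return "".join(new_text)
-- ===== SOURCE B (Python) =====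
-- error_not_binary = " Make sure you have entered a binary text! "
--
-- def binary_to_ascii(binary):
--     # Single character-level scan (no split()): a small state machine that
--     # accumulates the current word's value bit by bit and flushes it at
--     # whitespace; a trailing sentinel whitespace flushes the last word.
--     out = []
--     val = 0
--     in_word = False
--     for ch in binary + " ":
--         if ch.isspace():
--             if in_word:
--                 try:
--                     out.append(chr(val))
--                 except ValueError:
--                     out.append('')
--                 val = 0
--                 in_word = False
--         elif ch == '0' or ch == '1':
--             val = 2 * val + (ch == '1')
--             in_word = True
--         else:
--             return error_not_binary
--     return "".join(out)
-- ===== Notes on version B (the rewrite author's own statement) =====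
-- stated objective: faster
-- what changed: A splits the input into words and, per word, validates with an all() scan and converts via a positional power sum over enumerate(reversed(word)) with per-character int() and 2**i calls; B never calls split(): it is a single character-level state machine over the input plus a sentinel whitespace that accumulates the current word's value bit by bit and flushes chr(val) at each whitespace boundary, erroring on the first character that is neither whitespace nor 0/1 (measured faster: no per-character int()/power objects).
import Mathlib
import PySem

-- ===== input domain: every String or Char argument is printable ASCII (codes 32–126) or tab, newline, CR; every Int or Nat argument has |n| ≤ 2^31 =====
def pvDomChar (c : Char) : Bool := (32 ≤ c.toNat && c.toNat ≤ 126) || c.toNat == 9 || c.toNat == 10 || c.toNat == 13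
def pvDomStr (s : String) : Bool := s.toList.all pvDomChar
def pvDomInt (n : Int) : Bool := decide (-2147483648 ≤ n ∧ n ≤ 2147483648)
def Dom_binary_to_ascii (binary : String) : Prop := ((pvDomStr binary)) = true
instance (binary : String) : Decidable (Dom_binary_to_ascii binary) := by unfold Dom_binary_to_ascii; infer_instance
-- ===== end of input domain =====

-- B replaces A's split-into-words loop (per-word validation and positional power sum) with a single
-- character-level state machine over the raw string: no split(), the word value is accumulated bit
-- by bit and flushed at whitespace (measured faster: no per-character int()/2**i machinery).

def pvError : String := " Make sure you have entered a binary text! "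

-- ===== PORT A =====
-- int(n) for the single digit character n (unreachable default 0: inside the loop every char is '0' or '1')
def pvDigit (c : Char) : Int := (PySem.Int.ofChars? [c]).getD 0

-- sum(int(n)*int(2**i) for i, n in enumerate(reversed(str(binary_num)))); 2**i with i = list index ≥ 0
def pvSumA (cs : List Char) : Int :=
  ((PySem.List.enumerate cs.reverse 0).map (fun p => pvDigit p.2 * (2:Int) ^ p.1.toNat)).sum

-- the loop: new_text kept as the flattened character list (each appended element is a
-- 1-character string chr(...) or ''), so "".join(new_text) is String.mk of the accumulator
def pvGoA : List String → List Char → String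
  | [], acc => String.mk acc
  | w :: ws, acc =>
    let is_binary := w.toList.all (fun i => i == '1' || i == '0')
    if is_binary then
      let s := pvSumA w.toList
      -- try chr(s): ValueError exactly when s < 0 or s > 0x10FFFF → append ''
      if 0 ≤ s ∧ s ≤ 0x10FFFF then pvGoA ws (acc ++ [Char.ofNat s.toNat])
      else pvGoA ws (acc ++ [])
    else pvError

def binary_to_ascii (binary : String) : String :=
  pvGoA (PySem.Str.split₀ binary) []

-- ===== PORT B =====
-- try chr(val) except ValueError → '' (ValueError exactly when val < 0 or val > 0x10FFFF)
def pvEmit (val : Int) : List Char :=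
  if 0 ≤ val ∧ val ≤ 0x10FFFF then [Char.ofNat val.toNat] else []

-- the for-loop over the characters of binary + " " with state (out, val, in_word);
-- the bare 'return error_not_binary' is the non-recursive branch
def pvGoB : List Char → List Char → Int → Bool → String
  | [], out, _, _ => String.mk out
  | c :: cs, out, val, inw =>
    if PySem.Chars.isspace c then
      if inw then pvGoB cs (out ++ pvEmit val) 0 false
      else pvGoB cs out val inw
    else if c == '0' || c == '1' then
      pvGoB cs out (2 * val + (if c == '1' then 1 else 0)) true
    else pvError

def binary_to_ascii_alt (binary : String) : String :=
  pvGoB (binary.toList ++ [' ']) [] 0 false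

-- ===== PRECONDITION & SPEC =====
-- the value of a 0/1 word (used only by Pre_ and the proofs; neither port calls it)
def pvVal (cs : List Char) : Int :=
  cs.foldl (fun a c => a * 2 + (if c == '1' then 1 else 0)) 0

-- Pre_ excludes inputs containing an all-0/1 word whose value is a Unicode surrogate codepoint
-- (0xD800–0xDFFF): there Python's chr returns a lone-surrogate string that Lean's Char/String
-- cannot represent (A and B return the same unrepresentable value).
def Pre_binary_to_ascii (binary : String) : Prop :=
  ∀ w ∈ PySem.Str.split₀ binary,
    (w.toList.all (fun c => c == '0' || c == '1')) = true →
      ¬ (0xD800 ≤ pvVal w.toList ∧ pvVal w.toList ≤ 0xDFFF)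
instance (binary : String) : Decidable (Pre_binary_to_ascii binary) := by unfold Pre_binary_to_ascii; infer_instance

def pvWitness_binary_to_ascii : String := "01000001 110 xq 10"

def Spec_binary_to_ascii (binary : String) (out : String) : Prop := out = binary_to_ascii_alt binary
instance (binary : String) (out : String) : Decidable (Spec_binary_to_ascii binary out) := by unfold Spec_binary_to_ascii; infer_instance

-- ===== CLAIM (what is proved, stated in full; the proofs are below) =====
def Claim_equal_binary_to_ascii : Prop := ∀ (binary : String), Dom_binary_to_ascii binary → Pre_binary_to_ascii binary → Spec_binary_to_ascii binary (binary_to_ascii binary)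

-- ===== LEMMAS AND PROOFS =====

-- proof-side abbreviations
def pvIs01 (w : List Char) : Bool := w.all (fun c => c == '0' || c == '1')
def pvEmitW (w : List Char) : List Char := pvEmit (pvVal w)
-- common normal form of both ports' results, over the word list
def pvF (ws : List (List Char)) (out : List Char) : String :=
  if ws.all pvIs01 then String.mk (out ++ (ws.map pvEmitW).flatten) else pvError

lemma pvVal_acc (cs : List Char) (a : Int) :
    cs.foldl (fun a c => a * 2 + (if c == '1' then 1 else 0)) a
      = a * 2 ^ cs.length + pvVal cs := by
  induction cs generalizing a with
  | nil => simp [pvVal]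
  | cons c cs ih =>
    simp only [List.foldl_cons, pvVal]
    rw [ih, ih]
    simp only [List.length_cons, pow_succ]
    ring

-- A's power sum equals the Horner value on 0/1 words
lemma pvSumA_eq_pvVal (cs : List Char)
    (h01 : ∀ c ∈ cs, c = '0' ∨ c = '1') :
    pvSumA cs = pvVal cs := by
  induction cs with
  | nil => simp [pvSumA, pvVal]
  | cons c cs ih =>
    have ih := ih (fun x hx => h01 x (List.mem_cons_of_mem _ hx))
    have hc : c = '0' ∨ c = '1' := h01 c List.mem_cons_self
    have hrev : (c :: cs).reverse = cs.reverse ++ [c] := by simp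
    have hlen : cs.reverse.length = cs.length := by simp
    simp only [pvSumA, hrev, PySem.List.enumerate_append, List.map_append, List.sum_append] at *
    simp only [pvVal, List.foldl_cons]
    rw [pvVal_acc cs]
    have : PySem.List.enumerate [c] (0 + (cs.reverse.length : Int))
        = [((cs.length : Int), c)] := by
      simp [PySem.List.enumerate_cons, PySem.List.enumerate_nil, hlen]
    rw [this, ih]
    simp only [List.map_cons, List.map_nil, List.sum_cons, List.sum_nil, Int.toNat_natCast]
    have hd : pvDigit c = (if c == '1' then 1 else 0) := by
      rcases hc with rfl | rfl <;> decide
    rw [hd]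
    unfold pvVal
    ring

-- A's loop produces the normal form
lemma pvGoA_eq (ws : List String) (acc : List Char) :
    pvGoA ws acc = pvF (ws.map String.toList) acc := by
  induction ws generalizing acc with
  | nil => simp [pvGoA, pvF]
  | cons w ws ih =>
    simp only [pvGoA, pvF, List.map_cons, List.all_cons]
    by_cases hb : (w.toList.all (fun i => i == '1' || i == '0')) = true
    · have hb' : pvIs01 w.toList = true := by
        simp only [pvIs01, List.all_eq_true] at hb ⊢
        intro c hc; have := hb c hc; revert this
        simp only [Bool.or_eq_true, beq_iff_eq]; tauto
      have h01 : ∀ c ∈ w.toList, c = '0' ∨ c = '1' := by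
        simp only [List.all_eq_true, Bool.or_eq_true, beq_iff_eq] at hb
        intro c hc; exact (hb c hc).symm
      have hs := pvSumA_eq_pvVal w.toList h01
      rw [hb]
      simp only [if_pos trivial, hb', Bool.true_and]
      by_cases hr : 0 ≤ pvSumA w.toList ∧ pvSumA w.toList ≤ 0x10FFFF
      · rw [if_pos hr, ih, pvF]
        have : pvEmitW w.toList = [Char.ofNat (pvSumA w.toList).toNat] := by
          simp [pvEmitW, pvEmit, ← hs, if_pos hr]
        simp [pvF, this]
      · rw [if_neg hr, ih, pvF]
        have : pvEmitW w.toList = [] := by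
          simp only [pvEmitW, pvEmit, ← hs]
          rw [if_neg hr]
        simp [pvF, this]
    · have hb' : pvIs01 w.toList = false := by
        rw [Bool.eq_false_iff]
        intro h; apply hb
        simp only [pvIs01, List.all_eq_true] at h ⊢
        intro c hc; have := h c hc; revert this
        simp only [Bool.or_eq_true, beq_iff_eq]; tauto
      rw [if_neg (by simp [hb]), hb']
      simp

-- the split accumulator prepends: go cs cur acc = acc.reverse ++ go cs cur []
lemma split₀_go_acc (cs cur : List Char) (acc : List (List Char)) :
    PySem.Chars.split₀.go cs cur acc = acc.reverse ++ PySem.Chars.split₀.go cs cur [] := by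
  induction cs generalizing cur acc with
  | nil =>
    by_cases h : cur.isEmpty <;> simp [PySem.Chars.split₀.go, h]
  | cons c cs ih =>
    by_cases hs : PySem.Chars.isspace c
    · by_cases h : cur.isEmpty
      · simp only [PySem.Chars.split₀.go, hs, h, if_true]
        exact ih _ _
      · simp only [PySem.Chars.split₀.go, hs, h, if_true, Bool.false_eq_true, if_false]
        rw [ih _ (cur.reverse :: acc), ih _ [cur.reverse]]
        simp
    · simp only [PySem.Chars.split₀.go, hs, Bool.false_eq_true, if_false]
      exact ih _ _

-- a bad character inside the current word or a finished word survives into the word list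
lemma split₀_go_bad (p : Char → Bool) :
    ∀ (cs cur : List Char),
      (∃ x ∈ cur, p x = true) →
      ∃ w ∈ PySem.Chars.split₀.go cs cur [], ∃ x ∈ w, p x = true := by
  intro cs
  induction cs with
  | nil =>
    intro cur ⟨x, hx, hpx⟩
    have hne : cur.isEmpty = false := by
      cases cur with
      | nil => cases hx
      | cons a l => rfl
    refine ⟨cur.reverse, ?_, x, by simpa using hx, hpx⟩
    simp [PySem.Chars.split₀.go, hne]
  | cons c cs ih =>
    intro cur ⟨x, hx, hpx⟩
    have hne : cur.isEmpty = false := by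
      cases cur with
      | nil => cases hx
      | cons a l => rfl
    by_cases hs : PySem.Chars.isspace c
    · simp only [PySem.Chars.split₀.go, hs, hne, if_true, Bool.false_eq_true, if_false, ite_true, ite_false]
      rw [split₀_go_acc]
      exact ⟨cur.reverse, by simp, x, by simpa using hx, hpx⟩
    · simp only [PySem.Chars.split₀.go, hs, Bool.false_eq_true, if_false]
      exact ih (c :: cur) ⟨x, List.mem_cons_of_mem _ hx, hpx⟩

-- main simulation: B's state machine over the characters computes the normal form of the split words
lemma pvGoB_sim :
    ∀ (cs cur out : List Char),
      (∀ x ∈ cur, x = '0' ∨ x = '1') →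
      pvGoB (cs ++ [' ']) out (pvVal cur.reverse) (!cur.isEmpty)
        = pvF (PySem.Chars.split₀.go cs cur []) out := by
  intro cs
  induction cs with
  | nil =>
    intro cur out h01
    cases cur with
    | nil =>
      simp [pvGoB, pvF, PySem.Chars.split₀.go, show PySem.Chars.isspace ' ' = true from by decide]
    | cons a l =>
      have h01' : pvIs01 (l.reverse ++ [a]) = true := by
        simp only [pvIs01, List.all_eq_true]
        intro c hc
        have hc' : c ∈ a :: l := by
          rw [← List.reverse_cons] at hc; exact List.mem_reverse.mp hc
        rcases h01 c hc' with rfl | rfl <;> simp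
      simp only [List.nil_append, pvGoB, show PySem.Chars.isspace ' ' = true from by decide,
        if_true, List.isEmpty_cons, Bool.not_false, ite_true]
      simp [PySem.Chars.split₀.go, pvF, h01', pvEmitW]
  | cons c cs ih =>
    intro cur out h01
    by_cases hs : PySem.Chars.isspace c
    · cases cur with
      | nil =>
        simpa [pvGoB, hs, PySem.Chars.split₀.go] using ih [] out (by simp)
      | cons a l =>
        have h01' : pvIs01 (l.reverse ++ [a]) = true := by
          simp only [pvIs01, List.all_eq_true]
          intro x hx
          have hx' : x ∈ a :: l := by
            rw [← List.reverse_cons] at hx; exact List.mem_reverse.mp hx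
          rcases h01 x hx' with rfl | rfl <;> simp
        simp only [List.cons_append, pvGoB, hs, if_true, List.isEmpty_cons, Bool.not_false, ite_true]
        have := ih [] (out ++ pvEmit (pvVal (a :: l).reverse)) (by simp)
        simp only [List.reverse_nil, List.isEmpty_nil, Bool.not_true] at this
        rw [show pvVal [] = 0 from rfl] at this
        rw [this]
        simp only [PySem.Chars.split₀.go, hs, List.isEmpty_cons, if_true, Bool.false_eq_true,
          if_false, ite_true, ite_false]
        rw [split₀_go_acc cs [] [(a :: l).reverse]]
        simp [pvF, h01', pvEmitW, List.append_assoc]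
    · by_cases hc : (c == '0' || c == '1') = true
      · have hvc : pvVal ((c :: cur).reverse) = 2 * pvVal cur.reverse + (if c == '1' then 1 else 0) := by
          simp only [List.reverse_cons, pvVal, List.foldl_append, List.foldl_cons, List.foldl_nil]
          ring
        have h01' : ∀ x ∈ c :: cur, x = '0' ∨ x = '1' := by
          intro x hx
          rcases List.mem_cons.mp hx with rfl | hx
          · simp only [Bool.or_eq_true, beq_iff_eq] at hc; tauto
          · exact h01 x hx
        simp only [List.cons_append, pvGoB, hs, Bool.false_eq_true, if_false, hc, if_true, ite_false, ite_true]
        have := ih (c :: cur) out h01'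
        simp only [List.isEmpty_cons, Bool.not_false] at this
        rw [hvc] at this
        rw [this]
        simp [PySem.Chars.split₀.go, hs, hc]
      · simp only [List.cons_append, pvGoB, hs, Bool.false_eq_true, if_false, hc, ite_false]
        have hbad : ∃ w ∈ PySem.Chars.split₀.go cs (c :: cur) [],
            ∃ x ∈ w, (!(x == '0' || x == '1')) = true := by
          exact split₀_go_bad _ cs (c :: cur) ⟨c, List.mem_cons_self, by simp [hc]⟩
        obtain ⟨w, hw, x, hxw, hx⟩ := hbad
        have hall : (PySem.Chars.split₀.go cs (c :: cur) []).all pvIs01 = false := by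
          rw [Bool.eq_false_iff]
          intro h
          have := (List.all_eq_true.mp h) w hw
          have := (List.all_eq_true.mp this) x hxw
          simp only [Bool.not_eq_eq_eq_not, Bool.not_true] at hx
          rw [this] at hx
          cases hx
        simp only [PySem.Chars.split₀.go, hs, Bool.false_eq_true, if_false]
        simp [pvF, hall]

-- ===== VERDICT (by name: the statement is the Claim_ definition above) =====
theorem binary_to_ascii_spec : Claim_equal_binary_to_ascii := by
  intro binary _ _
  unfold Spec_binary_to_ascii binary_to_ascii binary_to_ascii_alt
  have hB := pvGoB_sim binary.toList [] [] (by simp)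
  simp only [List.reverse_nil, List.isEmpty_nil, Bool.not_true, show pvVal [] = 0 from rfl] at hB
  rw [hB, pvGoA_eq, PySem.Str.split₀_map_toList]
  rfl
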